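-- pv_equiv track=rewrite | github.com/vyrodovalexey/avapigw | test/performance/scripts/generate-new-features-charts.py | calculate_http_code_distribution
-- ===== SOURCE A (Python) =====
-- from collections import defaultdict
--
-- def calculate_http_code_distribution(http_codes):
--     """Calculate HTTP code distribution."""
--     distribution = defaultdict(int)
--     for code in http_codes:
--         if code < 200:
--             distribution['1xx'] += 1
--         elif code < 300:
--             distribution['2xx'] += 1
--         elif code < 400:
--             distribution['3xx'] += 1
--         elif code < 500:
--             distribution['4xx'] += 1
--         else:
--             distribution['5xx'] += 1
--     return dict(distribution)
-- ===== SOURCE B (Python) =====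
-- _LABELS = ("1xx", "2xx", "3xx", "4xx", "5xx")
-- _THRESHOLDS = (200, 300, 400, 500)
--
--
-- def calculate_http_code_distribution(http_codes):
--     """Calculate HTTP code distribution."""
--     classes = [_LABELS[sum(t <= code for t in _THRESHOLDS)] for code in http_codes]
--     seen = list(dict.fromkeys(classes))
--     return {k: classes.count(k) for k in seen}
-- ===== Notes on version B (the rewrite author's own statement) =====
-- stated objective: alternative
-- what changed: Replaces the single-pass if/elif ladder with defaultdict mutation by staged passes: classify each code by a threshold-count table lookup, dedup classes in first-seen order, then build the result with one classes.count pass per distinct class (no mutable counter).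
import Mathlib
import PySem

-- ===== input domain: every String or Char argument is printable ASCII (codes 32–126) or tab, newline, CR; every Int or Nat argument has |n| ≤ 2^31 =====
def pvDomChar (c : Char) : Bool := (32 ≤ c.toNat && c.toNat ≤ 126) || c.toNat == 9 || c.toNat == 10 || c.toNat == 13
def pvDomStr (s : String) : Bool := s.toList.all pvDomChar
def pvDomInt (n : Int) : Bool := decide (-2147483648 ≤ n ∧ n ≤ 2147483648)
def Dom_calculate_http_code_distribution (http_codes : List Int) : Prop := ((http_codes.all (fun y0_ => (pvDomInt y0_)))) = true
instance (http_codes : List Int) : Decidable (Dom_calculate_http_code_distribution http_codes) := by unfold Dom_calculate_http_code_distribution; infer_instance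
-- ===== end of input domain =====

-- B replaces A's if/elif ladder + defaultdict mutation by staged passes: a threshold-count table lookup
-- classifies each code, dedup keeps first-seen class order, and each distinct class is counted by its own
-- classes.count pass (objective: alternative decomposition, no mutable counter).


-- ===== PORT A =====
-- defaultdict(int); distribution[k] += 1 is Dict.modify k 0 (· + 1); dict(distribution) returned as items
def calculate_http_code_distribution (http_codes : List Int) : List (String × Int) :=
  (http_codes.foldl (fun d code =>
      if code < 200 then d.modify "1xx" 0 (· + 1)
      else if code < 300 then d.modify "2xx" 0 (· + 1)
      else if code < 400 then d.modify "3xx" 0 (· + 1)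
      else if code < 500 then d.modify "4xx" 0 (· + 1)
      else d.modify "5xx" 0 (· + 1)) PySem.Dict.empty).items

-- ===== PORT B =====
def pvLabels : List String := ["1xx", "2xx", "3xx", "4xx", "5xx"]
def pvThresholds : List Int := [200, 300, 400, 500]

-- _LABELS[sum(t <= code for t in _THRESHOLDS)]
def pvClassOf (code : Int) : String :=
  PySem.List.pyGetD pvLabels ((pvThresholds.map (fun t => if t ≤ code then (1 : Int) else 0)).sum) ""

def calculate_http_code_distribution_alt (http_codes : List Int) : List (String × Int) :=
  let classes := http_codes.map pvClassOf
  let seen := PySem.List.dedup classes            -- list(dict.fromkeys(classes))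
  seen.map (fun k => (k, (PySem.List.count classes k : Int)))   -- {k: classes.count(k) for k in seen}

-- ===== PRECONDITION & SPEC =====
def Spec_calculate_http_code_distribution (http_codes : List Int) (out : List (String × Int)) : Prop := out = calculate_http_code_distribution_alt http_codes
instance (http_codes : List Int) (out : List (String × Int)) : Decidable (Spec_calculate_http_code_distribution http_codes out) := by unfold Spec_calculate_http_code_distribution; infer_instance

-- ===== CLAIM (what is proved, stated in full; the proofs are below) =====
def Claim_equal_calculate_http_code_distribution : Prop := ∀ (http_codes : List Int), Dom_calculate_http_code_distribution http_codes → Spec_calculate_http_code_distribution http_codes (calculate_http_code_distribution http_codes)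

-- ===== LEMMAS AND PROOFS =====

-- the ladder's key equals B's threshold-count table lookup, for every Int code
theorem pvClassOf_eq (code : Int) :
    (if code < 200 then ("1xx" : String)
     else if code < 300 then "2xx"
     else if code < 400 then "3xx"
     else if code < 500 then "4xx"
     else "5xx") = pvClassOf code := by
  unfold pvClassOf pvThresholds
  simp only [List.map_cons, List.map_nil]
  rcases lt_or_ge code 200 with h1 | h1
  · rw [if_pos h1, if_neg (by omega : ¬(200:Int) ≤ code), if_neg (by omega : ¬(300:Int) ≤ code),
        if_neg (by omega : ¬(400:Int) ≤ code), if_neg (by omega : ¬(500:Int) ≤ code)]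
    decide
  rcases lt_or_ge code 300 with h2 | h2
  · rw [if_neg (by omega : ¬code < 200), if_pos h2, if_pos h1,
        if_neg (by omega : ¬(300:Int) ≤ code), if_neg (by omega : ¬(400:Int) ≤ code),
        if_neg (by omega : ¬(500:Int) ≤ code)]
    decide
  rcases lt_or_ge code 400 with h3 | h3
  · rw [if_neg (by omega : ¬code < 200), if_neg (by omega : ¬code < 300), if_pos h3, if_pos h1,
        if_pos h2, if_neg (by omega : ¬(400:Int) ≤ code), if_neg (by omega : ¬(500:Int) ≤ code)]
    decide
  rcases lt_or_ge code 500 with h4 | h4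
  · rw [if_neg (by omega : ¬code < 200), if_neg (by omega : ¬code < 300),
        if_neg (by omega : ¬code < 400), if_pos h4, if_pos h1, if_pos h2, if_pos h3,
        if_neg (by omega : ¬(500:Int) ≤ code)]
    decide
  · rw [if_neg (by omega : ¬code < 200), if_neg (by omega : ¬code < 300),
        if_neg (by omega : ¬code < 400), if_neg (by omega : ¬code < 500), if_pos h1, if_pos h2,
        if_pos h3, if_pos h4]
    decide

-- A's fold step is the Counter step applied to B's class key
theorem pvStep_eq (d : PySem.Dict String Int) (code : Int) :
    (if code < 200 then d.modify "1xx" 0 (· + 1)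
     else if code < 300 then d.modify "2xx" 0 (· + 1)
     else if code < 400 then d.modify "3xx" 0 (· + 1)
     else if code < 500 then d.modify "4xx" 0 (· + 1)
     else d.modify "5xx" 0 (· + 1)) = d.modify (pvClassOf code) 0 (· + 1) := by
  rw [← pvClassOf_eq code]
  split_ifs <;> rfl

-- ===== VERDICT (by name: the statement is the Claim_ definition above) =====
theorem calculate_http_code_distribution_spec : Claim_equal_calculate_http_code_distribution := by
  intro http_codes _
  unfold Spec_calculate_http_code_distribution calculate_http_code_distribution
    calculate_http_code_distribution_alt
  have h : (http_codes.foldl (fun d code =>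
      if code < 200 then d.modify "1xx" 0 (· + 1)
      else if code < 300 then d.modify "2xx" 0 (· + 1)
      else if code < 400 then d.modify "3xx" 0 (· + 1)
      else if code < 500 then d.modify "4xx" 0 (· + 1)
      else d.modify "5xx" 0 (· + 1)) PySem.Dict.empty)
      = PySem.Dict.counter (http_codes.map pvClassOf) := by
    rw [PySem.Dict.counter_eq_foldl, List.foldl_map]
    exact congrFun (congrFun (congrArg _ (funext fun d => funext fun c => pvStep_eq d c)) _) _
  rw [h, PySem.Dict.items_counter]
  simp [PySem.List.count_eq, PySem.List.dedup_eq_ofList]
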